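-- pv_equiv track=rewrite | github.com/raisedbywolves53/dscr_lead_gen | scrape/scripts/11_clerk_lender_lookup.py | classify_lender
-- ===== SOURCE A (Python) =====
-- HARD_MONEY_KEYWORDS = [
--     "kiavi", "lima one", "roc capital", "new silver", "civic financial",
--     "visio", "easy street", "relay", "anchor loans", "fund that flip",
--     "groundfloor", "haus lending", "investor's edge", "corevest",
--     "american heritage", "capital express", "genesis capital",
--     "temple view", "longitude", "lendingone", "rcn capital",
--     "toorak capital", "velocity mortgage", "private money",
--     "hard money", "bridge loan", "fix and flip",
-- ]
--
-- def classify_lender(name):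
--     """Classify lender as bank, hard_money, credit_union, private, other."""
--     if not name:
--         return ""
--     upper = name.upper()
--     for kw in HARD_MONEY_KEYWORDS:
--         if kw.upper() in upper:
--             return "hard_money"
--     if any(k in upper for k in ["CREDIT UNION", "FCU", "FEDERAL CREDIT"]):
--         return "credit_union"
--     if any(k in upper for k in ["BANK", "WELLS FARGO", "CHASE", "CITI",
--                                  "BOA", "JPMORGAN", "US BANK", "PNC",
--                                  "TD BANK", "FIFTH THIRD", "REGIONS"]):
--         return "bank"
--     if any(k in upper for k in ["MORTGAGE", "HOME LOAN", "LENDING",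
--                                  "FINANCIAL", "CAPITAL", "FUNDING"]):
--         return "mortgage_company"
--     if any(k in upper for k in ["LLC", "INC", "CORP", "TRUST", "LP"]):
--         return "other"
--     return "private"
-- ===== SOURCE B (Python) =====
-- HARD_MONEY_KEYWORDS = [
--     "kiavi", "lima one", "roc capital", "new silver", "civic financial",
--     "visio", "easy street", "relay", "anchor loans", "fund that flip",
--     "groundfloor", "haus lending", "investor's edge", "corevest",
--     "american heritage", "capital express", "genesis capital",
--     "temple view", "longitude", "lendingone", "rcn capital",
--     "toorak capital", "velocity mortgage", "private money",
--     "hard money", "bridge loan", "fix and flip",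
-- ]
--
-- _LABELS = ["hard_money", "credit_union", "bank", "mortgage_company", "other"]
--
-- _GROUPS = [
--     [k.upper() for k in HARD_MONEY_KEYWORDS],
--     ["CREDIT UNION", "FCU", "FEDERAL CREDIT"],
--     ["BANK", "WELLS FARGO", "CHASE", "CITI", "BOA", "JPMORGAN",
--      "US BANK", "PNC", "TD BANK", "FIFTH THIRD", "REGIONS"],
--     ["MORTGAGE", "HOME LOAN", "LENDING", "FINANCIAL", "CAPITAL", "FUNDING"],
--     ["LLC", "INC", "CORP", "TRUST", "LP"],
-- ]
--
-- # keyword -> priority (index of its label); keywords are pairwise distinct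
-- _KW = {kw: prio for prio, group in enumerate(_GROUPS) for kw in group}
--
-- # first character -> the (keyword, priority) pairs starting with it
-- _BY_FIRST = {}
-- for _kw, _p in _KW.items():
--     _BY_FIRST.setdefault(_kw[0], []).append((_kw, _p))
--
--
-- def classify_lender(name):
--     """Classify lender as bank, hard_money, credit_union, private, other."""
--     if not name:
--         return ""
--     upper = name.upper()
--     best = 5
--     for i in range(len(upper)):
--         for kw, p in _BY_FIRST.get(upper[i], ()):
--             if p < best and upper.startswith(kw, i):
--                 best = p
--     return _LABELS[best] if best < 5 else "private"
-- ===== Notes on version B (the rewrite author's own statement) =====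
-- stated objective: alternative
-- what changed: Instead of A's keyword-driven cascade of per-label substring-containment tests, B builds a keyword->priority dictionary bucketed by first character and does one name-driven pass: at each position of the uppercased name it checks only the bucketed keywords for a prefix match, keeps the minimum matched priority, and maps that priority to a label at the end.
import Mathlib
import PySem

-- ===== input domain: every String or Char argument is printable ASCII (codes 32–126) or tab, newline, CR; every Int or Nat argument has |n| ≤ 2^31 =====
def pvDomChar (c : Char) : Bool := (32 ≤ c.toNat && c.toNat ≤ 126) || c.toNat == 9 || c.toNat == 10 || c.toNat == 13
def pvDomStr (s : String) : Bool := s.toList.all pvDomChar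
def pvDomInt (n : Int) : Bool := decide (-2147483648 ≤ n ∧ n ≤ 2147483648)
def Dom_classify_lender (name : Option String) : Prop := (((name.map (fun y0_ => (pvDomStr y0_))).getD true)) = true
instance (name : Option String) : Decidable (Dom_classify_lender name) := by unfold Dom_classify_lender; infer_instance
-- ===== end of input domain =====

-- B replaces A's keyword-driven cascade of substring-containment branches by a name-driven
-- suffix scan over one keyword->priority table, keeping the minimum matched priority (alternative).

-- ===== PORT A =====
def HARD_MONEY_KEYWORDS : List String := ["kiavi", "lima one", "roc capital", "new silver", "civic financial", "visio", "easy street", "relay", "anchor loans", "fund that flip", "groundfloor", "haus lending", "investor's edge", "corevest", "american heritage", "capital express", "genesis capital", "temple view", "longitude", "lendingone", "rcn capital", "toorak capital", "velocity mortgage", "private money", "hard money", "bridge loan", "fix and flip"]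

def classify_lender (name : Option String) : String :=
  match name with
  | none => ""
  | some s =>
    if s = "" then ""   -- `not name` is also true for the empty string
    else
      let upper := PySem.Str.upper s
      if HARD_MONEY_KEYWORDS.any (fun kw => PySem.Str.isIn (PySem.Str.upper kw) upper) then "hard_money"
      else if (["CREDIT UNION", "FCU", "FEDERAL CREDIT"] : List String).any (fun k => PySem.Str.isIn k upper) then "credit_union"
      else if (["BANK", "WELLS FARGO", "CHASE", "CITI", "BOA", "JPMORGAN", "US BANK", "PNC", "TD BANK", "FIFTH THIRD", "REGIONS"] : List String).any (fun k => PySem.Str.isIn k upper) then "bank"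
      else if (["MORTGAGE", "HOME LOAN", "LENDING", "FINANCIAL", "CAPITAL", "FUNDING"] : List String).any (fun k => PySem.Str.isIn k upper) then "mortgage_company"
      else if (["LLC", "INC", "CORP", "TRUST", "LP"] : List String).any (fun k => PySem.Str.isIn k upper) then "other"
      else "private"

-- ===== PORT B =====
-- Source B's _LABELS and _GROUPS (group 0 is the hard-money list uppercased at build time)
def LABELS : List String := ["hard_money", "credit_union", "bank", "mortgage_company", "other"]

def GROUPS : List (List String) :=
  [HARD_MONEY_KEYWORDS.map PySem.Str.upper,
   ["CREDIT UNION", "FCU", "FEDERAL CREDIT"],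
   ["BANK", "WELLS FARGO", "CHASE", "CITI", "BOA", "JPMORGAN", "US BANK", "PNC", "TD BANK", "FIFTH THIRD", "REGIONS"],
   ["MORTGAGE", "HOME LOAN", "LENDING", "FINANCIAL", "CAPITAL", "FUNDING"],
   ["LLC", "INC", "CORP", "TRUST", "LP"]]

-- Source B's _KW dict: keyword -> priority, in insertion order (the keywords are pairwise
-- distinct, so this association list is exactly the dict's items); keys kept as List Char
def KW : List (List Char × Nat) :=
  GROUPS.zipIdx.flatMap (fun gp => gp.1.map (fun k => (k.toList, gp.2)))

-- Source B's _BY_FIRST index: the KW entries whose keyword starts with c, in order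
-- (Source B builds it once by grouping _KW on the first character; the bucket of c is this list)
def BUCKET (c : Char) : List (List Char × Nat) :=
  KW.filter (fun e => e.1.head? == some c)

-- the inner `for kw, p in _BY_FIRST.get(upper[i], ()): if p < best and upper.startswith(kw, i): best = p`
def bestStep (suf : List Char) (b : Nat) (e : List Char × Nat) : Nat :=
  if e.2 < b ∧ e.1.isPrefixOf suf then e.2 else b

-- the outer `for i in range(len(upper)):` loop, walking the suffixes of upper
def scanBest : List Char → Nat → Nat
  | [], b => b
  | c :: rest, b => scanBest rest ((BUCKET c).foldl (bestStep (c :: rest)) b)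

def classify_lender_alt (name : Option String) : String :=
  match name with
  | none => ""
  | some s =>
    if s = "" then ""
    else
      let best := scanBest (PySem.Str.upper s).toList 5
      if best < 5 then LABELS.getD best "private" else "private"

-- ===== PRECONDITION & SPEC =====
def Spec_classify_lender (name : Option String) (out : String) : Prop := out = classify_lender_alt name
instance (name : Option String) (out : String) : Decidable (Spec_classify_lender name out) := by unfold Spec_classify_lender; infer_instance

-- ===== CLAIM (what is proved, stated in full; the proofs are below) =====
def Claim_equal_classify_lender : Prop := ∀ (name : Option String), Dom_classify_lender name → Spec_classify_lender name (classify_lender name)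

-- ===== LEMMAS AND PROOFS =====

-- priority p has a keyword occurring somewhere in u
def Matched (u : List Char) (p : Nat) : Prop :=
  ∃ kw, (kw, p) ∈ KW ∧ PySem.Chars.isIn kw u = true

theorem mem_KW_iff (kw : List Char) (p : Nat) :
    (kw, p) ∈ KW ↔
      (p = 0 ∧ ∃ k ∈ HARD_MONEY_KEYWORDS, (PySem.Str.upper k).toList = kw) ∨
      (p = 1 ∧ ∃ k ∈ (["CREDIT UNION", "FCU", "FEDERAL CREDIT"] : List String), k.toList = kw) ∨
      (p = 2 ∧ ∃ k ∈ (["BANK", "WELLS FARGO", "CHASE", "CITI", "BOA", "JPMORGAN", "US BANK", "PNC", "TD BANK", "FIFTH THIRD", "REGIONS"] : List String), k.toList = kw) ∨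
      (p = 3 ∧ ∃ k ∈ (["MORTGAGE", "HOME LOAN", "LENDING", "FINANCIAL", "CAPITAL", "FUNDING"] : List String), k.toList = kw) ∨
      (p = 4 ∧ ∃ k ∈ (["LLC", "INC", "CORP", "TRUST", "LP"] : List String), k.toList = kw) := by
  simp only [KW, GROUPS, List.zipIdx_cons, List.zipIdx_nil, List.flatMap_cons, List.flatMap_nil,
    List.mem_append, List.mem_map, List.append_nil, Prod.mk.injEq, List.mem_cons,
    List.not_mem_nil, or_false]
  constructor
  · rintro (⟨a, ⟨k, hk, hup⟩, hl, hp⟩ | ⟨a, ha, hl, hp⟩ | ⟨a, ha, hl, hp⟩ | ⟨a, ha, hl, hp⟩ | ⟨a, ha, hl, hp⟩)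
    · exact Or.inl ⟨hp.symm, k, hk, by rw [hup]; exact hl⟩
    · exact Or.inr (Or.inl ⟨by omega, a, ha, hl⟩)
    · exact Or.inr (Or.inr (Or.inl ⟨by omega, a, ha, hl⟩))
    · exact Or.inr (Or.inr (Or.inr (Or.inl ⟨by omega, a, ha, hl⟩)))
    · exact Or.inr (Or.inr (Or.inr (Or.inr ⟨by omega, a, ha, hl⟩)))
  · rintro (⟨hp, k, hk, hl⟩ | ⟨hp, k, hk, hl⟩ | ⟨hp, k, hk, hl⟩ | ⟨hp, k, hk, hl⟩ | ⟨hp, k, hk, hl⟩) <;> subst hp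
    · exact Or.inl ⟨PySem.Str.upper k, ⟨k, hk, rfl⟩, hl, rfl⟩
    · exact Or.inr (Or.inl ⟨k, hk, hl, rfl⟩)
    · exact Or.inr (Or.inr (Or.inl ⟨k, hk, hl, rfl⟩))
    · exact Or.inr (Or.inr (Or.inr (Or.inl ⟨k, hk, hl, rfl⟩)))
    · exact Or.inr (Or.inr (Or.inr (Or.inr ⟨k, hk, hl, rfl⟩)))

theorem kw_ne_nil : ∀ e ∈ KW, e.1 ≠ [] := by decide

theorem matched_lt (u : List Char) (p : Nat) : Matched u p → p < 5 := by
  rintro ⟨kw, hmem, _⟩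
  rcases (mem_KW_iff kw p).mp hmem with ⟨hp, _⟩ | ⟨hp, _⟩ | ⟨hp, _⟩ | ⟨hp, _⟩ | ⟨hp, _⟩ <;> omega

-- the five Matched predicates, in the shape A's tests take after rewriting to Chars
theorem matched0 (u : List Char) :
    Matched u 0 ↔ (HARD_MONEY_KEYWORDS.any (fun kw => PySem.Chars.isIn (PySem.Chars.upper kw.toList) u)) = true := by
  simp only [Matched, mem_KW_iff, List.any_eq_true]
  constructor
  · rintro ⟨kw, h, hin⟩
    rcases h with ⟨_, k, hk, h1⟩ | ⟨h, _⟩ | ⟨h, _⟩ | ⟨h, _⟩ | ⟨h, _⟩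
    · exact ⟨k, hk, by rw [← PySem.Str.toList_upper, h1]; exact hin⟩
    all_goals omega
  · rintro ⟨k, hk, hin⟩
    exact ⟨(PySem.Str.upper k).toList, Or.inl ⟨trivial, k, hk, rfl⟩,
      by rwa [PySem.Str.toList_upper]⟩

theorem matchedG (u : List Char) (p : Nat) (g : List String)
    (hsel : ∀ kw, (kw, p) ∈ KW ↔ ∃ k ∈ g, k.toList = kw) :
    Matched u p ↔ (g.any (fun k => PySem.Chars.isIn k.toList u)) = true := by
  simp only [Matched, hsel, List.any_eq_true]
  constructor
  · rintro ⟨kw, ⟨k, hk, h1⟩, hin⟩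
    exact ⟨k, hk, h1 ▸ hin⟩
  · rintro ⟨k, hk, hin⟩
    exact ⟨k.toList, ⟨k, hk, rfl⟩, hin⟩

theorem matched1 (u : List Char) :
    Matched u 1 ↔ ((["CREDIT UNION", "FCU", "FEDERAL CREDIT"] : List String).any (fun k => PySem.Chars.isIn k.toList u)) = true := by
  refine matchedG u 1 _ (fun kw => ?_)
  rw [mem_KW_iff]
  constructor
  · rintro (⟨h, _⟩ | ⟨_, h2⟩ | ⟨h, _⟩ | ⟨h, _⟩ | ⟨h, _⟩)
    · omega
    · exact h2
    all_goals omega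
  · intro h; exact Or.inr (Or.inl ⟨rfl, h⟩)

theorem matched2 (u : List Char) :
    Matched u 2 ↔ ((["BANK", "WELLS FARGO", "CHASE", "CITI", "BOA", "JPMORGAN", "US BANK", "PNC", "TD BANK", "FIFTH THIRD", "REGIONS"] : List String).any (fun k => PySem.Chars.isIn k.toList u)) = true := by
  refine matchedG u 2 _ (fun kw => ?_)
  rw [mem_KW_iff]
  constructor
  · rintro (⟨h, _⟩ | ⟨h, _⟩ | ⟨_, h2⟩ | ⟨h, _⟩ | ⟨h, _⟩)
    · omega
    · omega
    · exact h2
    all_goals omega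
  · intro h; exact Or.inr (Or.inr (Or.inl ⟨rfl, h⟩))

theorem matched3 (u : List Char) :
    Matched u 3 ↔ ((["MORTGAGE", "HOME LOAN", "LENDING", "FINANCIAL", "CAPITAL", "FUNDING"] : List String).any (fun k => PySem.Chars.isIn k.toList u)) = true := by
  refine matchedG u 3 _ (fun kw => ?_)
  rw [mem_KW_iff]
  constructor
  · rintro (⟨h, _⟩ | ⟨h, _⟩ | ⟨h, _⟩ | ⟨_, h2⟩ | ⟨h, _⟩)
    · omega
    · omega
    · omega
    · exact h2
    · omega
  · intro h; exact Or.inr (Or.inr (Or.inr (Or.inl ⟨rfl, h⟩)))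

theorem matched4 (u : List Char) :
    Matched u 4 ↔ ((["LLC", "INC", "CORP", "TRUST", "LP"] : List String).any (fun k => PySem.Chars.isIn k.toList u)) = true := by
  refine matchedG u 4 _ (fun kw => ?_)
  rw [mem_KW_iff]
  constructor
  · rintro (⟨h, _⟩ | ⟨h, _⟩ | ⟨h, _⟩ | ⟨h, _⟩ | ⟨_, h2⟩)
    · omega
    · omega
    · omega
    · omega
    · exact h2
  · intro h; exact Or.inr (Or.inr (Or.inr (Or.inr ⟨rfl, h⟩)))

theorem bestStep_le (suf : List Char) (b : Nat) (e : List Char × Nat) : bestStep suf b e ≤ b := by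
  unfold bestStep; split_ifs with h
  · exact Nat.le_of_lt h.1
  · exact Nat.le_refl b

theorem foldl_bestStep_le (suf : List Char) :
    ∀ (L : List (List Char × Nat)) (b : Nat), L.foldl (bestStep suf) b ≤ b := by
  intro L
  induction L with
  | nil => intro b; exact Nat.le_refl b
  | cons e L ih =>
    intro b
    exact Nat.le_trans (ih (bestStep suf b e)) (bestStep_le suf b e)

theorem foldl_bestStep_le_of_mem (suf : List Char) (kw : List Char) (p : Nat) :
    ∀ (L : List (List Char × Nat)) (b : Nat), (kw, p) ∈ L → kw.isPrefixOf suf = true →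
      L.foldl (bestStep suf) b ≤ p := by
  intro L
  induction L with
  | nil => intro b h _; exact absurd h List.not_mem_nil
  | cons e L ih =>
    intro b hmem hpre
    rcases List.mem_cons.mp hmem with he | hL
    · subst he
      have hstep : bestStep suf b (kw, p) ≤ p := by
        unfold bestStep
        simp only [hpre, and_true]
        split_ifs with h
        · exact Nat.le_refl p
        · exact Nat.le_of_not_lt h
      exact Nat.le_trans (foldl_bestStep_le suf L _) hstep
    · exact ih _ hL hpre

theorem foldl_bestStep_cases (suf : List Char) :
    ∀ (L : List (List Char × Nat)) (b : Nat),
      L.foldl (bestStep suf) b = b ∨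
      ∃ kw p, (kw, p) ∈ L ∧ kw.isPrefixOf suf = true ∧ L.foldl (bestStep suf) b = p := by
  intro L
  induction L with
  | nil => intro b; exact Or.inl rfl
  | cons e L ih =>
    intro b
    rcases ih (bestStep suf b e) with h | ⟨kw, p, hm, hp, hv⟩
    · rw [List.foldl_cons, h]
      unfold bestStep
      split_ifs with hc
      · exact Or.inr ⟨e.1, e.2, List.mem_cons_self, hc.2, rfl⟩
      · exact Or.inl rfl
    · exact Or.inr ⟨kw, p, List.mem_cons_of_mem e hm, hp, by rw [List.foldl_cons]; exact hv⟩

theorem scanBest_le : ∀ (u : List Char) (b : Nat), scanBest u b ≤ b := by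
  intro u
  induction u with
  | nil => intro b; exact Nat.le_refl b
  | cons c rest ih =>
    intro b
    exact Nat.le_trans (ih _) (foldl_bestStep_le _ (BUCKET c) b)

theorem scanBest_le_of_match (kw : List Char) (p : Nat) (hmem : (kw, p) ∈ KW) (hne : kw ≠ []) :
    ∀ (u : List Char) (b : Nat), (∃ j, kw <+: u.drop j) → scanBest u b ≤ p := by
  intro u
  induction u with
  | nil =>
    rintro b ⟨j, hj⟩
    simp only [List.drop_nil] at hj
    exact absurd (List.prefix_nil.mp hj) hne
  | cons c rest ih =>
    rintro b ⟨j, hj⟩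
    cases j with
    | zero =>
      have hpre : kw.isPrefixOf (c :: rest) = true := List.isPrefixOf_iff_prefix.mpr hj
      have hb : (kw, p) ∈ BUCKET c := by
        refine List.mem_filter.mpr ⟨hmem, ?_⟩
        cases kw with
        | nil => exact absurd rfl hne
        | cons a kt =>
          rcases hj with ⟨t, ht⟩
          have : a = c := (List.cons.injEq a (kt ++ t) c rest).mp ht |>.1
          simp [this]
      exact Nat.le_trans (scanBest_le rest _)
        (foldl_bestStep_le_of_mem _ kw p (BUCKET c) b hb hpre)
    | succ j' =>
      simp only [List.drop_succ_cons] at hj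
      exact ih _ ⟨j', hj⟩

theorem matched_scan_le (u : List Char) (p : Nat) (b : Nat) :
    Matched u p → scanBest u b ≤ p := by
  rintro ⟨kw, hmem, hin⟩
  exact scanBest_le_of_match kw p hmem (kw_ne_nil _ hmem)
    u b ((PySem.Chars.exists_prefix_drop_iff_isIn kw u).mpr hin)

theorem scanBest_cases : ∀ (u : List Char) (b : Nat),
    scanBest u b = b ∨ ∃ p, Matched u p ∧ scanBest u b = p := by
  intro u
  induction u with
  | nil => intro b; exact Or.inl rfl
  | cons c rest ih =>
    intro b
    rcases ih ((BUCKET c).foldl (bestStep (c :: rest)) b) with h | ⟨p, ⟨kw, hm, hin⟩, hv⟩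
    · rw [show scanBest (c :: rest) b = scanBest rest ((BUCKET c).foldl (bestStep (c :: rest)) b) from rfl, h]
      rcases foldl_bestStep_cases (c :: rest) (BUCKET c) b with h2 | ⟨kw, p, hm, hp, hv⟩
      · exact Or.inl h2
      · refine Or.inr ⟨p, ⟨kw, (List.mem_filter.mp hm).1, ?_⟩, hv⟩
        exact (PySem.Chars.isIn_iff_infix kw (c :: rest)).mpr
          (List.isPrefixOf_iff_prefix.mp hp).isInfix
    · refine Or.inr ⟨p, ⟨kw, hm, ?_⟩, hv⟩
      exact (PySem.Chars.isIn_iff_infix kw (c :: rest)).mpr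
        (List.infix_cons ((PySem.Chars.isIn_iff_infix kw rest).mp hin))

-- the scan returns the least matched priority
theorem scan_eq_of (u : List Char) (i : Nat) (hi : i < 5) (hmi : Matched u i)
    (hlow : ∀ q, q < i → ¬ Matched u q) : scanBest u 5 = i := by
  have hle := matched_scan_le u i 5 hmi
  rcases scanBest_cases u 5 with h | ⟨p, hp, hv⟩
  · omega
  · have h1 : ¬ p < i := fun hpi => hlow p hpi hp
    omega

theorem scan_eq_five (u : List Char) (hnone : ∀ q, ¬ Matched u q) : scanBest u 5 = 5 := by
  rcases scanBest_cases u 5 with h | ⟨p, hp, _⟩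
  · exact h
  · exact absurd hp (hnone p)

-- ===== VERDICT (by name: the statement is the Claim_ definition above) =====
theorem classify_lender_spec : Claim_equal_classify_lender := by
  intro name _
  unfold Spec_classify_lender classify_lender classify_lender_alt
  cases name with
  | none => rfl
  | some s =>
    by_cases hs : s = ""
    · simp [hs]
    · simp only [if_neg hs, PySem.Str.isIn_eq, PySem.Str.toList_upper]
      set u := PySem.Chars.upper s.toList with hu
      cases h0 : HARD_MONEY_KEYWORDS.any (fun kw => PySem.Chars.isIn (PySem.Chars.upper kw.toList) u) with
      | true =>
        have hsc : scanBest u 5 = 0 :=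
          scan_eq_of u 0 (by omega) ((matched0 u).mpr h0) (by omega)
        simp [hsc, LABELS]
      | false =>
      cases h1 : (["CREDIT UNION", "FCU", "FEDERAL CREDIT"] : List String).any (fun k => PySem.Chars.isIn k.toList u) with
      | true =>
        have hsc : scanBest u 5 = 1 := by
          refine scan_eq_of u 1 (by omega) ((matched1 u).mpr h1) ?_
          intro q hq
          interval_cases q
          · rw [matched0]; simp [h0]
        simp [hsc, LABELS]
      | false =>
      cases h2 : (["BANK", "WELLS FARGO", "CHASE", "CITI", "BOA", "JPMORGAN", "US BANK", "PNC", "TD BANK", "FIFTH THIRD", "REGIONS"] : List String).any (fun k => PySem.Chars.isIn k.toList u) with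
      | true =>
        have hsc : scanBest u 5 = 2 := by
          refine scan_eq_of u 2 (by omega) ((matched2 u).mpr h2) ?_
          intro q hq
          interval_cases q
          · rw [matched0]; simp [h0]
          · rw [matched1]; simp [h1]
        simp [hsc, LABELS]
      | false =>
      cases h3 : (["MORTGAGE", "HOME LOAN", "LENDING", "FINANCIAL", "CAPITAL", "FUNDING"] : List String).any (fun k => PySem.Chars.isIn k.toList u) with
      | true =>
        have hsc : scanBest u 5 = 3 := by
          refine scan_eq_of u 3 (by omega) ((matched3 u).mpr h3) ?_
          intro q hq
          interval_cases q
          · rw [matched0]; simp [h0]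
          · rw [matched1]; simp [h1]
          · rw [matched2]; simp [h2]
        simp [hsc, LABELS]
      | false =>
      cases h4 : (["LLC", "INC", "CORP", "TRUST", "LP"] : List String).any (fun k => PySem.Chars.isIn k.toList u) with
      | true =>
        have hsc : scanBest u 5 = 4 := by
          refine scan_eq_of u 4 (by omega) ((matched4 u).mpr h4) ?_
          intro q hq
          interval_cases q
          · rw [matched0]; simp [h0]
          · rw [matched1]; simp [h1]
          · rw [matched2]; simp [h2]
          · rw [matched3]; simp [h3]
        simp [hsc, LABELS]
      | false =>
        have hsc : scanBest u 5 = 5 := by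
          refine scan_eq_five u ?_
          intro q hq
          have := matched_lt u q hq
          interval_cases q
          · exact absurd ((matched0 u).mp hq) (by simp [h0])
          · exact absurd ((matched1 u).mp hq) (by simp [h1])
          · exact absurd ((matched2 u).mp hq) (by simp [h2])
          · exact absurd ((matched3 u).mp hq) (by simp [h3])
          · exact absurd ((matched4 u).mp hq) (by simp [h4])
        simp [hsc]
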